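-- pv_equiv track=rewrite | github.com/lucasle-sn/lexical-normalization | src/2GRAM.py | two_gram_distance
-- ===== SOURCE A (Python) =====
-- def two_gram_create(element):
--     string_sub = [element[0]]
--     for i in range(len(element) - (2 - 1)):
--         string_sub.append(element[i:i + 2])
--     string_sub.append(element[len(element) - 1])
--     return string_sub
--
-- def two_gram_distance(element1, element2):
--     element1_gram = two_gram_create(element1)
--     element2_gram = two_gram_create(element2)
--     similarity = 0
--
--     for i in range(len(element1_gram)):
--         for j in range(len(element2_gram)):
--             if element1_gram[i] == element2_gram[j]:
--                 similarity = similarity + 1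
--                 element2_gram = array_remove(j, element2_gram)
--                 break
--
--     return len(element1)+len(element2) + 2 - 2*similarity
--
-- def array_remove(index, array):
--     array_sub = []
--     for i in range(index):
--         array_sub.append(array[i])
--     for i in range(index, len(array) - 1):
--         array_sub.append(array[i+1])
--     return array_sub
-- ===== SOURCE B (Python) =====
-- def two_gram_create(element):
--     string_sub = [element[0]]
--     for i in range(len(element) - (2 - 1)):
--         string_sub.append(element[i:i + 2])
--     string_sub.append(element[len(element) - 1])
--     return string_sub
--
-- def two_gram_distance(element1, element2):
--     gram1 = sorted(two_gram_create(element1))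
--     gram2 = sorted(two_gram_create(element2))
--     i = j = similarity = 0
--     while i < len(gram1) and j < len(gram2):
--         if gram1[i] == gram2[j]:
--             similarity += 1
--             i += 1
--             j += 1
--         elif gram1[i] < gram2[j]:
--             i += 1
--         else:
--             j += 1
--     return len(element1) + len(element2) + 2 - 2*similarity
-- ===== Notes on version B (the rewrite author's own statement) =====
-- stated objective: faster
-- what changed: Replaces the quadratic greedy scan-and-remove over the second gram list with sorting both gram lists once and a single two-pointer merge that counts the multiset intersection.
-- outside the precondition, e.g. on two_gram_distance('', 'ab'): A raises IndexError, B raises IndexError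
import Mathlib
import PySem

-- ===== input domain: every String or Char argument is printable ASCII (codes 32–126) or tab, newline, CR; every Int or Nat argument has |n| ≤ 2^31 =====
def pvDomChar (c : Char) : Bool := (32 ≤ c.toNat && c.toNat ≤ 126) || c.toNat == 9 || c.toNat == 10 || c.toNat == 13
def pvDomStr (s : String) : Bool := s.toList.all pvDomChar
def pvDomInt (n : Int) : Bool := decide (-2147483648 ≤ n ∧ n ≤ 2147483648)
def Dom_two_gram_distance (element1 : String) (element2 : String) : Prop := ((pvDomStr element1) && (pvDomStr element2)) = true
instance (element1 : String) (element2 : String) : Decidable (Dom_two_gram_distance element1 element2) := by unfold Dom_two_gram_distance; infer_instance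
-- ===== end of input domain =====

-- B replaces A's quadratic greedy scan-and-remove with sorting both gram lists and a single
-- two-pointer merge counting the multiset intersection (objective: faster, asymptotic).

-- ===== PORT A =====
-- two_gram_create (shared helper of both Python versions); grams are 1- or 2-char strings, as List Char
def pvTgc (l : List Char) : List (List Char) :=
  let stringSub : List (List Char) := [[PySem.List.pyGetD l 0 ' ']]
  let stringSub := (PySem.List.pyRange 0 (PySem.List.len l - (2 - 1))).foldl
      (fun acc i => acc ++ [PySem.List.slice l (some i) (some (i + 2))]) stringSub
  stringSub ++ [[PySem.List.pyGetD l (PySem.List.len l - 1) ' ']]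

-- array_remove
def pvArrayRemove (index : Int) (array : List (List Char)) : List (List Char) :=
  let arraySub : List (List Char) := []
  let arraySub := (PySem.List.pyRange 0 index).foldl
      (fun acc i => acc ++ [PySem.List.pyGetD array i []]) arraySub
  (PySem.List.pyRange index (PySem.List.len array - 1)).foldl
      (fun acc i => acc ++ [PySem.List.pyGetD array (i + 1) []]) arraySub

-- the inner 'for j in range(len(element2_gram)): … break' — first j with a match
def pvScanJ (x : List Char) (g2 : List (List Char)) : List Int → Option Int
  | [] => none
  | j :: rest => if PySem.List.pyGetD g2 j [] = x then some j else pvScanJ x g2 rest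

-- body of the outer loop: state = (similarity, element2_gram)
def pvStepA (p : Int × List (List Char)) (x : List Char) : Int × List (List Char) :=
  match pvScanJ x p.2 (PySem.List.pyRange 0 (PySem.List.len p.2)) with
  | some j => (p.1 + 1, pvArrayRemove j p.2)
  | none => p

def two_gram_distance (element1 : String) (element2 : String) : Int :=
  let element1Gram := pvTgc element1.toList
  let element2Gram := pvTgc element2.toList
  let st := (PySem.List.pyRange 0 (PySem.List.len element1Gram)).foldl
      (fun p i => pvStepA p (PySem.List.pyGetD element1Gram i [])) ((0 : Int), element2Gram)
  PySem.Str.len element1 + PySem.Str.len element2 + 2 - 2 * st.1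

-- ===== PORT B =====
-- Python's list/str '<' is lexicographic; pinned to the lexicographic linear order on List Char
def pvMergeCount : List (List Char) → List (List Char) → Int
  | [], _ => 0
  | _ :: _, [] => 0
  | a :: t1, b :: t2 =>
    if a = b then pvMergeCount t1 t2 + 1
    else if @LT.lt _ List.instLinearOrder.toLT a b then pvMergeCount t1 (b :: t2)
    else pvMergeCount (a :: t1) t2
termination_by l1 l2 => l1.length + l2.length

def two_gram_distance_alt (element1 : String) (element2 : String) : Int :=
  let gram1 := @PySem.List.sorted (List Char) (List Char) List.instLinearOrder.toLT
      (@LinearOrder.toDecidableLT _ List.instLinearOrder) (pvTgc element1.toList) (fun x => x) false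
  let gram2 := @PySem.List.sorted (List Char) (List Char) List.instLinearOrder.toLT
      (@LinearOrder.toDecidableLT _ List.instLinearOrder) (pvTgc element2.toList) (fun x => x) false
  PySem.Str.len element1 + PySem.Str.len element2 + 2 - 2 * pvMergeCount gram1 gram2

-- ===== PRECONDITION & SPEC =====
-- Pre_ excludes only empty strings, on which both Pythons raise IndexError in two_gram_create.
def Pre_two_gram_distance (element1 : String) (element2 : String) : Prop :=
  element1 ≠ "" ∧ element2 ≠ ""
instance (element1 : String) (element2 : String) : Decidable (Pre_two_gram_distance element1 element2) := by unfold Pre_two_gram_distance; infer_instance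
def pvWitness_two_gram_distance : String × String := ("ab", "b")

def Spec_two_gram_distance (element1 : String) (element2 : String) (out : Int) : Prop := out = two_gram_distance_alt element1 element2
instance (element1 : String) (element2 : String) (out : Int) : Decidable (Spec_two_gram_distance element1 element2 out) := by unfold Spec_two_gram_distance; infer_instance

-- ===== CLAIM (what is proved, stated in full; the proofs are below) =====
def Claim_equal_two_gram_distance : Prop := ∀ (element1 : String) (element2 : String), Dom_two_gram_distance element1 element2 → Pre_two_gram_distance element1 element2 → Spec_two_gram_distance element1 element2 (two_gram_distance element1 element2)

-- ===== LEMMAS AND PROOFS =====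

-- abbreviation used only in proofs
def pvSimGreedy : List (List Char) → List (List Char) → Nat
  | [], _ => 0
  | x :: t, l2 => if x ∈ l2 then pvSimGreedy t (l2.erase x) + 1 else pvSimGreedy t l2

lemma pvGetD_succ_tail (l : List (List Char)) (i : Int) (hi : 0 ≤ i) :
    PySem.List.pyGetD l (i + 1) [] = PySem.List.pyGetD l.tail i [] := by
  obtain ⟨n, rfl⟩ : ∃ n : Nat, i = (n : Int) := ⟨i.toNat, by omega⟩
  cases l with
  | nil => rfl
  | cons a t =>
      simp [PySem.List.pyGetD, PySem.List.pyGet?_cons_succ, PySem.List.pyGet?_natCast]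

lemma pvTakeMap (g2 : List (List Char)) (n : Nat) (hn : n ≤ g2.length) :
    (PySem.List.pyRange 0 (n : Int)).map (fun i => PySem.List.pyGetD g2 i []) = g2.take n := by
  have hcongr : ∀ i ∈ PySem.List.pyRange 0 (n : Int),
      PySem.List.pyGetD g2 i [] = PySem.List.pyGetD (g2.take n) i [] := by
    intro i hi
    rw [PySem.List.mem_pyRange_one] at hi
    obtain ⟨k, rfl⟩ : ∃ k : Nat, i = (k : Int) := ⟨i.toNat, by omega⟩
    have hk : k < n := by omega
    simp [PySem.List.pyGetD_natCast, List.getD, List.getElem?_take, if_pos hk]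
  rw [List.map_congr_left hcongr]
  have hlen : (n : Int) = PySem.List.len (g2.take n) := by
    simp [PySem.List.len_eq, List.length_take]
    omega
  rw [hlen, PySem.List.map_pyGetD_pyRange_zero]

lemma pvArrayRemove_eq_eraseIdx (g2 : List (List Char)) (n : Nat) (hn : n < g2.length) :
    pvArrayRemove (n : Int) g2 = g2.eraseIdx n := by
  unfold pvArrayRemove
  rw [PySem.List.foldl_append_singleton_eq_map, PySem.List.foldl_append_singleton_eq_map]
  rw [pvTakeMap g2 n (le_of_lt hn)]
  have hcongr : ∀ i ∈ PySem.List.pyRange (n : Int) (PySem.List.len g2 - 1),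
      PySem.List.pyGetD g2 (i + 1) [] = PySem.List.pyGetD g2.tail i [] := by
    intro i hi
    rw [PySem.List.mem_pyRange_one] at hi
    exact pvGetD_succ_tail g2 i (by omega)
  rw [List.map_congr_left hcongr]
  have hlen : PySem.List.len g2 - 1 = PySem.List.len g2.tail := by
    simp [PySem.List.len_eq, List.length_tail]
    omega
  rw [hlen, PySem.List.map_pyGetD_pyRange g2.tail [] (a := (n : Int)) (by omega)]
  rw [List.eraseIdx_eq_take_drop_succ]
  simp [List.drop_tail]

lemma pvScanJ_go (x : List Char) : ∀ (n : Nat) (g2 : List (List Char)) (k : Nat),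
    k + n = g2.length →
    pvScanJ x g2 (PySem.List.pyRange (k : Int) (PySem.List.len g2)) =
      (List.idxOf? x (g2.drop k)).map (fun m => ((k + m : Nat) : Int)) := by
  intro n
  induction n with
  | zero =>
      intro g2 k hk
      have hkk : PySem.List.len g2 = (k : Int) := by simp [PySem.List.len_eq]; omega
      have hr : PySem.List.pyRange (k : Int) (k : Int) = [] := by
        simp [PySem.List.pyRange]
      have h2 : g2.drop k = [] := List.drop_eq_nil_of_le (by omega)
      rw [hkk, hr, h2]
      simp [pvScanJ]
  | succ m ih =>
      intro g2 k hk
      have hklt : k < g2.length := by omega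
      rw [PySem.List.pyRange_one_cons (by simp [PySem.List.len_eq]; omega)]
      have hdrop : g2.drop k = g2[k] :: g2.drop (k + 1) := (List.getElem_cons_drop hklt).symm
      have hget : PySem.List.pyGetD g2 (k : Int) [] = g2[k] := by
        simp [PySem.List.pyGetD_natCast, List.getD, List.getElem?_eq_getElem hklt]
      by_cases hx : g2[k] = x
      · simp [pvScanJ, hget, hx, hdrop, List.idxOf?_cons]
      · have hstep : ((k : Int) + 1) = ((k + 1 : Nat) : Int) := by push_cast; ring
        rw [pvScanJ, if_neg (by rw [hget]; exact hx), hstep, ih g2 (k + 1) (by omega)]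
        rw [hdrop, List.idxOf?_cons]
        simp only [beq_iff_eq, hx, if_false]
        cases List.idxOf? x (g2.drop (k + 1)) with
        | none => simp
        | some j => simp; ring

lemma pvScanJ_spec (x : List Char) (g2 : List (List Char)) :
    pvScanJ x g2 (PySem.List.pyRange 0 (PySem.List.len g2)) =
      (List.idxOf? x g2).map (fun m : Nat => (m : Int)) := by
  have h := pvScanJ_go x g2.length g2 0 (by omega)
  simp only [Nat.cast_zero, Nat.zero_add, List.drop_zero] at h
  exact h

lemma pvStepA_eq (p : Int × List (List Char)) (x : List Char) :
    pvStepA p x = if x ∈ p.2 then (p.1 + 1, p.2.erase x) else p := by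
  unfold pvStepA
  rw [pvScanJ_spec]
  rcases hidx : List.idxOf? x p.2 with _ | i
  · rw [if_neg (List.idxOf?_eq_none_iff.mp hidx)]
    rfl
  · obtain ⟨hlt, hget, -⟩ := List.idxOf?_eq_some_iff.mp hidx
    have hmem : x ∈ p.2 := hget ▸ List.getElem_mem hlt
    have herase : p.2.erase x = p.2.eraseIdx i := by
      rw [List.erase_eq_eraseIdx, hidx]
    rw [if_pos hmem]
    show (p.1 + 1, pvArrayRemove ((i : Nat) : Int) p.2) = (p.1 + 1, p.2.erase x)
    rw [pvArrayRemove_eq_eraseIdx p.2 i hlt, herase]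

lemma pvFoldl_greedy (l1 : List (List Char)) : ∀ (s : Int) (l2 : List (List Char)),
    (l1.foldl (fun p x => if x ∈ p.2 then (p.1 + 1, p.2.erase x) else p) (s, l2)).1
      = s + (pvSimGreedy l1 l2 : Int) := by
  induction l1 with
  | nil => intro s l2; simp [pvSimGreedy]
  | cons x t ih =>
      intro s l2
      by_cases h : x ∈ l2
      · simp only [List.foldl_cons, if_pos h, pvSimGreedy, ih]
        push_cast; ring
      · simp only [List.foldl_cons, if_neg h, pvSimGreedy, ih]

lemma pvCoeErase (l : List (List Char)) (x : List Char) :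
    ((l.erase x : List (List Char)) : Multiset (List Char)) = (l : Multiset (List Char)).erase x := by
  rw [Multiset.coe_erase]
  rw [lawful_beq_subsingleton (instBEqOfDecidableEq) (inferInstance : BEq (List Char))]

lemma pvSimGreedy_eq_inter (l1 : List (List Char)) : ∀ (l2 : List (List Char)),
    pvSimGreedy l1 l2 = ((l1 : Multiset (List Char)) ∩ (l2 : Multiset (List Char))).card := by
  induction l1 with
  | nil => intro l2; simp [pvSimGreedy]
  | cons x t ih =>
      intro l2
      by_cases h : x ∈ l2
      · rw [pvSimGreedy, if_pos h, ih]
        rw [show ((x :: t : List (List Char)) : Multiset (List Char)) = x ::ₘ (t : Multiset (List Char)) from rfl]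
        rw [Multiset.cons_inter_of_pos _ (by simpa using h), ← pvCoeErase l2 x,
          Multiset.card_cons]
      · rw [pvSimGreedy, if_neg h, ih]
        rw [show ((x :: t : List (List Char)) : Multiset (List Char)) = x ::ₘ (t : Multiset (List Char)) from rfl]
        rw [Multiset.cons_inter_of_neg _ (by simpa using h)]

lemma pvNotMem_of_lt_head (a b : List Char) (t2 : List (List Char))
    (hab : @LT.lt _ List.instLinearOrder.toLT a b)
    (h2 : (b :: t2).Pairwise (· ≤ ·)) : a ∉ (b :: t2) := by
  intro hmem
  rcases List.mem_cons.mp hmem with rfl | hmem'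
  · exact lt_irrefl a hab
  · exact absurd ((List.pairwise_cons.mp h2).1 a hmem') (not_le.mpr hab)

lemma pvMergeCount_eq_inter (l1 l2 : List (List Char))
    (h1 : l1.Pairwise (· ≤ ·)) (h2 : l2.Pairwise (· ≤ ·)) :
    pvMergeCount l1 l2 = (((l1 : Multiset (List Char)) ∩ (l2 : Multiset (List Char))).card : Int) := by
  fun_induction pvMergeCount l1 l2 with
  | case1 l2 => simp [Multiset.zero_inter]
  | case2 a t1 => simp [Multiset.inter_zero]
  | case3 t1 b t2 ih =>
      rw [show ((b :: t1 : List (List Char)) : Multiset (List Char)) = b ::ₘ (t1 : Multiset (List Char)) from rfl]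
      rw [Multiset.cons_inter_of_pos _ (by simp)]
      rw [show ((b :: t2 : List (List Char)) : Multiset (List Char)) = b ::ₘ (t2 : Multiset (List Char)) from rfl]
      rw [Multiset.erase_cons_head, Multiset.card_cons]
      rw [ih (List.pairwise_cons.mp h1).2 (List.pairwise_cons.mp h2).2]
      push_cast; ring
  | case4 a t1 b t2 hne hlt ih =>
      rw [show ((a :: t1 : List (List Char)) : Multiset (List Char)) = a ::ₘ (t1 : Multiset (List Char)) from rfl]
      rw [Multiset.cons_inter_of_neg _ (by simpa using pvNotMem_of_lt_head a b t2 hlt h2)]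
      exact ih (List.pairwise_cons.mp h1).2 h2
  | case5 a t1 b t2 hne hnlt ih =>
      have hba : @LT.lt _ List.instLinearOrder.toLT b a :=
        lt_of_le_of_ne (not_lt.mp hnlt) (Ne.symm hne)
      rw [Multiset.inter_comm]
      rw [show ((b :: t2 : List (List Char)) : Multiset (List Char)) = b ::ₘ (t2 : Multiset (List Char)) from rfl]
      rw [Multiset.cons_inter_of_neg _ (by simpa using pvNotMem_of_lt_head b a t1 hba h1)]
      rw [Multiset.inter_comm]
      exact ih h1 (List.pairwise_cons.mp h2).2

lemma pvSim_common (g1 g2 : List (List Char)) :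
    (0 : Int) + (pvSimGreedy g1 g2 : Int)
      = pvMergeCount
          (@PySem.List.sorted (List Char) (List Char) List.instLinearOrder.toLT
            (@LinearOrder.toDecidableLT _ List.instLinearOrder) g1 (fun x => x) false)
          (@PySem.List.sorted (List Char) (List Char) List.instLinearOrder.toLT
            (@LinearOrder.toDecidableLT _ List.instLinearOrder) g2 (fun x => x) false) := by
  rw [pvMergeCount_eq_inter _ _ (by exact PySem.List.sorted_pairwise g1 (fun x => x))
    (by exact PySem.List.sorted_pairwise g2 (fun x => x))]
  rw [Multiset.coe_eq_coe.mpr (@PySem.List.sorted_perm (List Char) (List Char) List.instLinearOrder.toLT (@LinearOrder.toDecidableLT _ List.instLinearOrder) g1 (fun x => x) false)]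
  rw [Multiset.coe_eq_coe.mpr (@PySem.List.sorted_perm (List Char) (List Char) List.instLinearOrder.toLT (@LinearOrder.toDecidableLT _ List.instLinearOrder) g2 (fun x => x) false)]
  rw [pvSimGreedy_eq_inter]
  ring

-- ===== VERDICT (by name: the statement is the Claim_ definition above) =====
theorem two_gram_distance_spec : Claim_equal_two_gram_distance := by
  intro e1 e2 _ _
  unfold Spec_two_gram_distance two_gram_distance two_gram_distance_alt
  simp only []
  rw [PySem.List.foldl_pyRange_zero_pyGetD (pvTgc e1.toList) [] pvStepA ((0 : Int), pvTgc e2.toList)]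
  rw [PySem.List.foldl_congr_mem (pvTgc e1.toList) pvStepA
    (fun (p : Int × List (List Char)) x => if x ∈ p.2 then (p.1 + 1, p.2.erase x) else p)
    ((0 : Int), pvTgc e2.toList) (fun acc x _ => pvStepA_eq acc x)]
  rw [pvFoldl_greedy, pvSim_common]
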